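-- pv_equiv track=rewrite | github.com/alex-jb/orallexa-ai-trading-agent | skills/prediction_markets.py | _bullish_sign
-- ===== SOURCE A (Python) =====
-- _BULLISH_KEYWORDS = (
--     "beat", "beats", "above", "exceed", "exceeds", "surge", "rally",
--     "hit", "reach", "reaches", "up", "rise", "rises", "high", "breakout",
--     "win", "wins", "approve", "approval", "bullish",
-- )
--
-- _BEARISH_KEYWORDS = (
--     "miss", "misses", "below", "crash", "plunge", "decline",
--     "down", "fall", "falls", "low", "breakdown", "lose", "loses",
--     "reject", "rejection", "bearish", "drop", "drops",
-- )
--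
-- def _bullish_sign(question: str) -> int:
--     """
--     Return +1 if the question's 'Yes' outcome implies bullish for the ticker,
--     -1 if it implies bearish, 0 if unclear.
--     """
--     q = question.lower()
--     bull = sum(1 for w in _BULLISH_KEYWORDS if w in q)
--     bear = sum(1 for w in _BEARISH_KEYWORDS if w in q)
--     if bull > bear:
--         return 1
--     if bear > bull:
--         return -1
--     return 0
-- ===== SOURCE B (Python) =====
-- _WEIGHTS = {
--     "beat": 1, "beats": 1, "above": 1, "exceed": 1, "exceeds": 1,
--     "surge": 1, "rally": 1, "hit": 1, "reach": 1, "reaches": 1,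
--     "up": 1, "rise": 1, "rises": 1, "high": 1, "breakout": 1,
--     "win": 1, "wins": 1, "approve": 1, "approval": 1, "bullish": 1,
--     "miss": -1, "misses": -1, "below": -1, "crash": -1, "plunge": -1,
--     "decline": -1, "down": -1, "fall": -1, "falls": -1, "low": -1,
--     "breakdown": -1, "lose": -1, "loses": -1, "reject": -1,
--     "rejection": -1, "bearish": -1, "drop": -1, "drops": -1,
-- }
--
-- _BY_FIRST = {}
-- for _w in _WEIGHTS:
--     _BY_FIRST.setdefault(_w[0], []).append(_w)
--
-- def _bullish_sign(question: str) -> int: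
--     """Text-driven scan: walk the lowered question once; at each position try
--     only the keywords indexed by that position's first character, collecting
--     the distinct matched keywords; return the sign of their summed weights."""
--     q = question.lower()
--     found = set()
--     for i, c in enumerate(q):
--         for w in _BY_FIRST.get(c, ()):
--             if w not in found and q.startswith(w, i):
--                 found.add(w)
--     net = sum(_WEIGHTS[w] for w in found)
--     return (net > 0) - (net < 0)
-- ===== Notes on version B (the rewrite author's own statement) =====
-- stated objective: alternative
-- what changed: Replaces A's per-keyword substring tests and two-count comparison with a single left-to-right scan of the question that at each position tries only the keywords indexed by their first character, collects the distinct matches in a set, and returns the sign of their summed weights.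
import Mathlib
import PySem

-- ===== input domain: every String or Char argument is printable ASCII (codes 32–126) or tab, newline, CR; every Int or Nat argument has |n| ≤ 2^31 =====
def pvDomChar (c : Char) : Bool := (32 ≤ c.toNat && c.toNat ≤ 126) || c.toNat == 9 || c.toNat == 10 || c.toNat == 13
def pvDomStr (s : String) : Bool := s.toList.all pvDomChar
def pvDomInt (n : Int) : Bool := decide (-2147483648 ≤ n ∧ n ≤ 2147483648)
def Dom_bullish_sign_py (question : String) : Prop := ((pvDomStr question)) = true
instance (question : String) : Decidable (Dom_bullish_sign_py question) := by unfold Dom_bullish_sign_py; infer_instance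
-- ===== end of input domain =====

-- B replaces A's per-keyword substring tests and two-count comparison with a single
-- left-to-right scan of the question that at each position tries only the keywords
-- indexed by their first character, collecting the distinct matches in a set and
-- returning the sign of their summed weights (objective: alternative).

-- ===== PORT A =====
def pvBullishKeywords : List String :=
  ["beat", "beats", "above", "exceed", "exceeds", "surge", "rally",
   "hit", "reach", "reaches", "up", "rise", "rises", "high", "breakout",
   "win", "wins", "approve", "approval", "bullish"]

def pvBearishKeywords : List String :=
  ["miss", "misses", "below", "crash", "plunge", "decline",
   "down", "fall", "falls", "low", "breakdown", "lose", "loses",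
   "reject", "rejection", "bearish", "drop", "drops"]

def bullish_sign_py (question : String) : Int :=
  let q := PySem.Str.lower question
  let bull : Int := ((pvBullishKeywords.filter (fun w => PySem.Str.isIn w q)).map (fun _ => (1 : Int))).sum
  let bear : Int := ((pvBearishKeywords.filter (fun w => PySem.Str.isIn w q)).map (fun _ => (1 : Int))).sum
  if bull > bear then 1 else if bear > bull then -1 else 0

-- ===== PORT B =====
-- _WEIGHTS: the dict literal of Source B
def pvWeights : PySem.Dict String Int :=
  PySem.Dict.ofList
    [("beat", 1), ("beats", 1), ("above", 1), ("exceed", 1), ("exceeds", 1),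
     ("surge", 1), ("rally", 1), ("hit", 1), ("reach", 1), ("reaches", 1),
     ("up", 1), ("rise", 1), ("rises", 1), ("high", 1), ("breakout", 1),
     ("win", 1), ("wins", 1), ("approve", 1), ("approval", 1), ("bullish", 1),
     ("miss", -1), ("misses", -1), ("below", -1), ("crash", -1), ("plunge", -1),
     ("decline", -1), ("down", -1), ("fall", -1), ("falls", -1), ("low", -1),
     ("breakdown", -1), ("lose", -1), ("loses", -1), ("reject", -1),
     ("rejection", -1), ("bearish", -1), ("drop", -1), ("drops", -1)]

-- _BY_FIRST: 'for _w in _WEIGHTS: _BY_FIRST.setdefault(_w[0], []).append(_w)';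
-- _w[0] (a one-char string; every key is nonempty) is modelled as the head Char.
def pvByFirst : PySem.Dict Char (List String) :=
  (PySem.Dict.keys pvWeights).foldl
    (fun d w =>
      PySem.Dict.insert d (w.toList.headD ' ')
        (PySem.Dict.getD d (w.toList.headD ' ') [] ++ [w]))
    PySem.Dict.empty

def bullish_sign_py_alt (question : String) : Int :=
  let q := (PySem.Str.lower question).toList
  let found : PySem.Set String :=
    (PySem.List.enumerate q 0).foldl
      (fun s p =>
        (PySem.Dict.getD pvByFirst p.2 []).foldl
          (fun s w =>
            -- 'q.startswith(w, i)' with 0 ≤ i ≤ len(q) is exactly startswith on the suffix q[i:]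
            if !PySem.Set.contains s w && PySem.Chars.startswith (q.drop p.1.toNat) w.toList
            then PySem.Set.add s w else s)
          s)
      PySem.Set.empty
  -- sum(_WEIGHTS[w] for w in found): order-independent sum; every w in found is a key of
  -- _WEIGHTS (so the total getD with default 0 is exact here)
  let net : Int := (found.map (fun w => PySem.Dict.getD pvWeights w 0)).sum
  (if net > 0 then (1 : Int) else 0) - (if net < 0 then (1 : Int) else 0)

-- ===== PRECONDITION & SPEC =====
def Spec_bullish_sign_py (question : String) (out : Int) : Prop := out = bullish_sign_py_alt question
instance (question : String) (out : Int) : Decidable (Spec_bullish_sign_py question out) := by unfold Spec_bullish_sign_py; infer_instance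

-- ===== CLAIM (what is proved, stated in full; the proofs are below) =====
def Claim_equal_bullish_sign_py : Prop := ∀ (question : String), Dom_bullish_sign_py question → Spec_bullish_sign_py question (bullish_sign_py question)

-- ===== LEMMAS AND PROOFS =====

-- A's generator-sum over a keyword list is its countP.
lemma pv_count_eq (q : String) (L : List String) :
    ((L.filter (fun w => PySem.Str.isIn w q)).map (fun _ => (1 : Int))).sum
      = (L.countP (fun w => PySem.Str.isIn w q) : Int) := by
  induction L with
  | nil => simp
  | cons w L ih =>
      cases h : PySem.Str.isIn w q <;>
        simp only [List.filter_cons, List.countP_cons, h, Bool.false_eq_true, ite_false, ite_true,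
          List.map_cons, List.sum_cons, ih] <;> push_cast <;> ring

-- every string in any bucket of the _BY_FIRST construction is one of the listed words
lemma pv_build_inv (P : String → Prop) :
    ∀ (l : List String) (d : PySem.Dict Char (List String)),
      (∀ c w, w ∈ PySem.Dict.getD d c [] → P w) → (∀ w ∈ l, P w) →
      ∀ c w,
        w ∈ PySem.Dict.getD
              (l.foldl (fun d w =>
                PySem.Dict.insert d (w.toList.headD ' ')
                  (PySem.Dict.getD d (w.toList.headD ' ') [] ++ [w])) d) c []
          → P w := by
  intro l
  induction l with
  | nil => intro d hd _ c w hw; exact hd c w hw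
  | cons x l ih =>
      intro d hd hl c w hw
      refine ih _ ?_ (fun w hwl => hl w (List.mem_cons_of_mem _ hwl)) c w hw
      intro c' w' hw'
      rw [PySem.Dict.getD_insert] at hw'
      by_cases hc : c' = x.toList.headD ' '
      · simp only [hc, if_true] at hw'
        rcases List.mem_append.1 hw' with h | h
        · exact hd _ _ h
        · simp only [List.mem_singleton] at h; subst h; exact hl _ List.mem_cons_self
      · simp only [hc, if_false] at hw'
        exact hd _ _ hw'

lemma pv_bucket_sub (c : Char) (w : String) (hw : w ∈ PySem.Dict.getD pvByFirst c []) :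
    w ∈ pvBullishKeywords ++ pvBearishKeywords := by
  have hkeys : ∀ w ∈ PySem.Dict.keys pvWeights, w ∈ pvBullishKeywords ++ pvBearishKeywords := by
    set_option maxRecDepth 16384 in decide
  exact pv_build_inv (fun w => w ∈ pvBullishKeywords ++ pvBearishKeywords)
    (PySem.Dict.keys pvWeights) PySem.Dict.empty
    (by intro c' w' h; simp [PySem.Dict.getD_empty] at h) hkeys c w hw

-- each listed word sits in the bucket of its own first character
lemma pv_bucket_self :
    ∀ w ∈ pvBullishKeywords ++ pvBearishKeywords,
      w ∈ PySem.Dict.getD pvByFirst (w.toList.headD ' ') [] := by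
  set_option maxRecDepth 16384 in decide

lemma pv_keywords_nonempty :
    ∀ w ∈ pvBullishKeywords ++ pvBearishKeywords, w.toList ≠ [] := by set_option maxRecDepth 16384 in decide

lemma pv_keywords_nodup : (pvBullishKeywords ++ pvBearishKeywords).Nodup := by set_option maxRecDepth 16384 in decide

lemma pv_weight_bull : ∀ w ∈ pvBullishKeywords, PySem.Dict.getD pvWeights w 0 = 1 := by set_option maxRecDepth 16384 in decide
lemma pv_weight_bear : ∀ w ∈ pvBearishKeywords, PySem.Dict.getD pvWeights w 0 = -1 := by set_option maxRecDepth 16384 in decide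

-- the guarded inner step is the plain conditional Set.add (add is a no-op on members)
lemma pv_inner_eq (q : List Char) (i : Nat) (ws : List String) (s : PySem.Set String) :
    ws.foldl (fun s w =>
        if !PySem.Set.contains s w && PySem.Chars.startswith (q.drop i) w.toList
        then PySem.Set.add s w else s) s
      = PySem.Set.update s (ws.filter (fun w => PySem.Chars.startswith (q.drop i) w.toList)) := by
  have h : ws.foldl (fun s w =>
        if !PySem.Set.contains s w && PySem.Chars.startswith (q.drop i) w.toList
        then PySem.Set.add s w else s) s
      = ws.foldl (fun s w =>
        if PySem.Chars.startswith (q.drop i) w.toList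
        then PySem.Set.add s w else s) s := by
    refine PySem.List.foldl_congr_mem _ _ _ _ ?_
    intro s' w _
    by_cases hc : PySem.Set.contains s' w = true
    · have hm : w ∈ s' := (PySem.Set.contains_iff s' w).1 hc
      simp [hm]
    · have hn : w ∉ s' := fun hm => hc ((PySem.Set.contains_iff s' w).2 hm)
      simp [hn]
  rw [h, PySem.List.foldl_if_eq_foldl_filter]
  rfl

-- the scan loop is ofList of all (position, matching word) hits
lemma pv_foldl_update {α : Type} (g : α → List String) :
    ∀ (l : List α) (s : PySem.Set String),
      l.foldl (fun s x => PySem.Set.update s (g x)) s = PySem.Set.update s (l.flatMap g) := by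
  intro l
  induction l with
  | nil => simp [PySem.Set.update_nil]
  | cons x l ih => intro s; simp [List.flatMap_cons, PySem.Set.update_append, ih]

-- the scan fold is ofList of all (position, matching word) hits
set_option maxRecDepth 16384 in
lemma pv_found_ofList (q : List Char) :
    (PySem.List.enumerate q 0).foldl
        (fun s p =>
          (PySem.Dict.getD pvByFirst p.2 []).foldl
            (fun s w =>
              if !PySem.Set.contains s w && PySem.Chars.startswith (q.drop p.1.toNat) w.toList
              then PySem.Set.add s w else s) s)
        PySem.Set.empty
      = PySem.Set.ofList ((PySem.List.enumerate q 0).flatMap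
          (fun p => (PySem.Dict.getD pvByFirst p.2 []).filter
            (fun w => PySem.Chars.startswith (q.drop p.1.toNat) w.toList))) := by
  have h := PySem.List.foldl_congr_mem
    (PySem.List.enumerate q 0)
    (fun s (p : Int × Char) =>
      (PySem.Dict.getD pvByFirst p.2 []).foldl
        (fun s w =>
          if !PySem.Set.contains s w && PySem.Chars.startswith (q.drop p.1.toNat) w.toList
          then PySem.Set.add s w else s) s)
    (fun s p => PySem.Set.update s ((PySem.Dict.getD pvByFirst p.2 []).filter
        (fun w => PySem.Chars.startswith (q.drop p.1.toNat) w.toList)))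
    (PySem.Set.empty : PySem.Set String)
    (fun s p _ => pv_inner_eq q p.1.toNat _ s)
  rw [h, pv_foldl_update]; exact PySem.Set.update_nil_left _

-- membership in the matched set = "this word is a keyword occurring in q"
lemma pv_found_char (q : List Char) (w : String) :
    (∃ p ∈ PySem.List.enumerate q 0,
        w ∈ PySem.Dict.getD pvByFirst p.2 []
          ∧ PySem.Chars.startswith (q.drop p.1.toNat) w.toList = true)
      ↔ w ∈ pvBullishKeywords ++ pvBearishKeywords ∧ PySem.Chars.isIn w.toList q = true := by
  constructor
  · intro ⟨p, hp, hb, hs⟩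
    refine ⟨pv_bucket_sub _ _ hb, ?_⟩
    exact (PySem.Chars.exists_prefix_drop_iff_isIn w.toList q).1
      ⟨p.1.toNat, (PySem.Chars.startswith_iff _ _).1 hs⟩
  · intro ⟨hk, hin⟩
    rcases (PySem.Chars.exists_prefix_drop_iff_isIn w.toList q).2 hin with ⟨j, hj⟩
    rcases hj with ⟨t, ht⟩
    have hwne : w.toList ≠ [] := pv_keywords_nonempty w hk
    have hdropne : q.drop j ≠ [] := by
      rw [← ht]; intro h; exact hwne (List.append_eq_nil_iff.1 h).1
    have hjlt : j < q.length := by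
      by_contra h
      exact hdropne (List.drop_eq_nil_iff.2 (by omega))
    refine ⟨((j : Int), q[j]), ?_, ?_, ?_⟩
    · exact (PySem.List.mem_enumerate_iff q 0 _).2 ⟨j, hjlt, by simp⟩
    · -- q[j] is w's first character
      have hhead : q[j] = w.toList.headD ' ' := by
        have hlen : 0 < (q.drop j).length := List.length_pos_iff.2 hdropne
        have h0 : q[j] = (q.drop j)[0]'hlen := by
          simp [List.getElem_drop]
        rw [h0]
        rcases hl : w.toList with _ | ⟨c, cs⟩
        · exact absurd hl hwne
        · have : q.drop j = c :: (cs ++ t) := by rw [← ht, hl]; simp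
          simp [this]
      rw [hhead]; exact pv_bucket_self w hk
    · simp only [Int.toNat_natCast]
      exact (PySem.Chars.startswith_iff _ _).2 ⟨t, ht⟩

-- B's net total is (bullish matches) − (bearish matches)
lemma pv_net_eq (q : List Char) :
    (((PySem.List.enumerate q 0).foldl
        (fun s p =>
          (PySem.Dict.getD pvByFirst p.2 []).foldl
            (fun s w =>
              if !PySem.Set.contains s w && PySem.Chars.startswith (q.drop p.1.toNat) w.toList
              then PySem.Set.add s w else s) s)
        PySem.Set.empty).map (fun w => PySem.Dict.getD pvWeights w 0)).sum
      = (pvBullishKeywords.countP (fun w => PySem.Chars.isIn w.toList q) : Int)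
        - (pvBearishKeywords.countP (fun w => PySem.Chars.isIn w.toList q) : Int) := by
  rw [pv_found_ofList]
  set F := PySem.Set.ofList ((PySem.List.enumerate q 0).flatMap
      (fun p => (PySem.Dict.getD pvByFirst p.2 []).filter
        (fun w => PySem.Chars.startswith (q.drop p.1.toNat) w.toList))) with hF
  have hnodupF : F.Nodup := PySem.Set.nodup_ofList _
  have hnodupK : ((pvBullishKeywords ++ pvBearishKeywords).filter
      (fun w => PySem.Chars.isIn w.toList q)).Nodup := pv_keywords_nodup.filter _
  have hperm : F.Perm ((pvBullishKeywords ++ pvBearishKeywords).filter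
      (fun w => PySem.Chars.isIn w.toList q)) := by
    rw [List.perm_ext_iff_of_nodup hnodupF hnodupK]
    intro w
    rw [hF, PySem.Set.mem_ofList, List.mem_filter]
    constructor
    · intro h
      rcases List.mem_flatMap.1 h with ⟨p, hp, hw⟩
      rcases List.mem_filter.1 hw with ⟨hw1, hw2⟩
      exact (pv_found_char q w).1 ⟨p, hp, hw1, hw2⟩
    · intro h
      rcases (pv_found_char q w).2 h with ⟨p, hp, hw1, hw2⟩
      exact List.mem_flatMap.2 ⟨p, hp, List.mem_filter.2 ⟨hw1, hw2⟩⟩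
  rw [(hperm.map (fun w => PySem.Dict.getD pvWeights w 0)).sum_eq]
  rw [List.filter_append, List.map_append, List.sum_append]
  rw [List.map_congr_left (fun w hw => pv_weight_bull w (List.mem_of_mem_filter hw)),
      List.map_congr_left (fun w hw => pv_weight_bear w (List.mem_of_mem_filter hw))]
  rw [PySem.List.sum_map_const_int, PySem.List.sum_map_const_int]
  simp only [List.countP_eq_length_filter]
  ring

-- ===== VERDICT (by name: the statement is the Claim_ definition above) =====
theorem bullish_sign_py_spec : Claim_equal_bullish_sign_py := by
  intro question _
  unfold Spec_bullish_sign_py bullish_sign_py bullish_sign_py_alt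
  simp only [pv_count_eq, pv_net_eq]
  have hpred : ∀ (w : String), PySem.Str.isIn w (PySem.Str.lower question)
      = PySem.Chars.isIn w.toList (PySem.Str.lower question).toList := by
    intro w; simp [PySem.Str.isIn_eq]
  simp only [hpred]
  set b := (pvBullishKeywords.countP
      (fun w => PySem.Chars.isIn w.toList (PySem.Str.lower question).toList) : Int)
  set r := (pvBearishKeywords.countP
      (fun w => PySem.Chars.isIn w.toList (PySem.Str.lower question).toList) : Int)
  split_ifs <;> omega
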